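-- pv_equiv track=rewrite | github.com/fangzhao2019/system_code-version2 | save_to_database/word_of_mouth/KouBeiCiYun.py | getRepeatFeaturePointIndex
-- ===== SOURCE A (Python) =====
-- def getRepeatFeaturePointIndex(list, coarse, fine, feature_point):
--     i = -1
--     index = -1
--     for record in list:
--         i = i + 1
--         if coarse == record['coarse_grained_feature'] and fine == record['fine_grained_feature'] and record['feature_point'] == feature_point:
--             index = i
--     return index
-- ===== SOURCE B (Python) =====
-- def getRepeatFeaturePointIndex(list, coarse, fine, feature_point):
--     for i in range(len(list) - 1, -1, -1):
--         record = list[i]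
--         if coarse == record['coarse_grained_feature'] and fine == record['fine_grained_feature'] and record['feature_point'] == feature_point:
--             return i
--     return -1
-- ===== Notes on version B (the rewrite author's own statement) =====
-- stated objective: simpler
-- what changed: Replaces the full forward scan that keeps overwriting a running 'index' variable with a reverse index loop that returns immediately at the first (i.e. last forward) match, maintaining no accumulator.
import Mathlib
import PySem

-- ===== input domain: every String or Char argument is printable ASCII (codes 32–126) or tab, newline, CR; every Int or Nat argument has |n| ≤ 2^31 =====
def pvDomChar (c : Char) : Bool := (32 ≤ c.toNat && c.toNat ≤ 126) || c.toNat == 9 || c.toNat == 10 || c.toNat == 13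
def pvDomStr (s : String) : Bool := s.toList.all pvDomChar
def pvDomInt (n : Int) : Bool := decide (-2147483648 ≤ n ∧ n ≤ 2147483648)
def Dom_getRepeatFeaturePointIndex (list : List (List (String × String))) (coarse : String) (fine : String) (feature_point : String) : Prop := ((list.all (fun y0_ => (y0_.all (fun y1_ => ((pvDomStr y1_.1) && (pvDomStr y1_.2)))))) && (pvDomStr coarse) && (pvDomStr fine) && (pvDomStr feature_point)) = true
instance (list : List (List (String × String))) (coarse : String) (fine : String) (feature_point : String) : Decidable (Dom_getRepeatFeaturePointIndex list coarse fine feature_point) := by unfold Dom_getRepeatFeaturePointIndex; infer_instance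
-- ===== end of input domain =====

-- B replaces A's full forward scan with an overwritten running index by a reverse
-- index loop that returns at the first (= last forward) match; objective: simpler.


-- Shared helper: Python dict lookup on the association-list encoding (first match),
-- defaulting to "" — the default is never reached inside Pre_ (all needed keys present).
def pvLookup (d : List (String × String)) (k : String) : String :=
  ((d.find? (fun kv => kv.1 == k)).map (·.2)).getD ""

def pvHasKey (d : List (String × String)) (k : String) : Bool :=
  d.any (fun kv => kv.1 == k)

-- The three-field condition, exactly as both Pythons write it (same operand order).
def pvMatch (record : List (String × String)) (coarse fine feature_point : String) : Bool :=
  coarse == pvLookup record "coarse_grained_feature" &&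
    (fine == pvLookup record "fine_grained_feature" &&
      pvLookup record "feature_point" == feature_point)

-- ===== PORT A =====
def getRepeatFeaturePointIndex (list : List (List (String × String))) (coarse : String) (fine : String) (feature_point : String) : Int :=
  (list.foldl
    (fun (s : Int × Int) record =>
      let i := s.1 + 1
      (i, if pvMatch record coarse fine feature_point then i else s.2))
    (-1, -1)).2

-- ===== PORT B =====
-- Reverse index loop 'for i in range(len(list)-1, -1, -1)' as downward recursion:
-- pvAltGo n inspects indices n-1, n-2, …, 0 and returns at the first match.
def pvAltGo (list : List (List (String × String))) (coarse fine feature_point : String) : Nat → Int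
  | 0 => -1
  | n + 1 =>
    let record := (PySem.List.pyGet? list (n : Int)).getD []
    if pvMatch record coarse fine feature_point then (n : Int)
    else pvAltGo list coarse fine feature_point n

def getRepeatFeaturePointIndex_alt (list : List (List (String × String))) (coarse : String) (fine : String) (feature_point : String) : Int :=
  pvAltGo list coarse fine feature_point list.length

-- ===== PRECONDITION & SPEC =====
-- Pre_ excludes exactly the inputs where Python A raises KeyError: following A's
-- short-circuit, every record needs the coarse key; the fine key only when the coarse
-- value matches; the feature_point key only when the fine value also matches.
def Pre_getRepeatFeaturePointIndex (list : List (List (String × String))) (coarse : String) (fine : String) (feature_point : String) : Prop :=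
  ∀ r ∈ list, pvHasKey r "coarse_grained_feature" = true ∧
    (pvLookup r "coarse_grained_feature" = coarse →
      pvHasKey r "fine_grained_feature" = true ∧
        (pvLookup r "fine_grained_feature" = fine →
          pvHasKey r "feature_point" = true))
instance (list : List (List (String × String))) (coarse : String) (fine : String) (feature_point : String) : Decidable (Pre_getRepeatFeaturePointIndex list coarse fine feature_point) := by unfold Pre_getRepeatFeaturePointIndex; infer_instance

def pvWitness_getRepeatFeaturePointIndex : (List (List (String × String))) × String × String × String :=
  ([[("coarse_grained_feature", "a"), ("fine_grained_feature", "b"), ("feature_point", "c")],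
    [("coarse_grained_feature", "x")]],
   "a", "b", "c")

def Spec_getRepeatFeaturePointIndex (list : List (List (String × String))) (coarse : String) (fine : String) (feature_point : String) (out : Int) : Prop := out = getRepeatFeaturePointIndex_alt list coarse fine feature_point
instance (list : List (List (String × String))) (coarse : String) (fine : String) (feature_point : String) (out : Int) : Decidable (Spec_getRepeatFeaturePointIndex list coarse fine feature_point out) := by unfold Spec_getRepeatFeaturePointIndex; infer_instance

-- ===== CLAIM (what is proved, stated in full; the proofs are below) =====
def Claim_equal_getRepeatFeaturePointIndex : Prop := ∀ (list : List (List (String × String))) (coarse : String) (fine : String) (feature_point : String), Dom_getRepeatFeaturePointIndex list coarse fine feature_point → Pre_getRepeatFeaturePointIndex list coarse fine feature_point → Spec_getRepeatFeaturePointIndex list coarse fine feature_point (getRepeatFeaturePointIndex list coarse fine feature_point)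

-- ===== LEMMAS AND PROOFS =====

-- A's loop step.
def pvStepA (coarse fine feature_point : String) (s : Int × Int) (record : List (String × String)) : Int × Int :=
  let i := s.1 + 1
  (i, if pvMatch record coarse fine feature_point then i else s.2)

theorem pvFoldA_eq (list : List (List (String × String))) (coarse fine feature_point : String) :
    getRepeatFeaturePointIndex list coarse fine feature_point =
      (list.foldl (pvStepA coarse fine feature_point) (-1, -1)).2 := rfl

theorem pvFoldA_fst (coarse fine feature_point : String) :
    ∀ (list : List (List (String × String))) (s : Int × Int),
      (list.foldl (pvStepA coarse fine feature_point) s).1 = s.1 + list.length := by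
  intro list
  induction list with
  | nil => intro s; simp
  | cons x xs ih =>
    intro s
    simp only [List.foldl_cons, List.length_cons, ih]
    simp [pvStepA]
    ring

-- pvAltGo only looks at indices below n, so appending past n changes nothing.
theorem pvAltGo_append (list : List (List (String × String))) (x : List (String × String))
    (coarse fine feature_point : String) :
    ∀ n, n ≤ list.length →
      pvAltGo (list ++ [x]) coarse fine feature_point n =
        pvAltGo list coarse fine feature_point n := by
  intro n
  induction n with
  | zero => intro _; rfl
  | succ m ih =>
    intro h
    have hm : m < list.length := h
    have hget : PySem.List.pyGet? (list ++ [x]) (m : Int) = PySem.List.pyGet? list (m : Int) := by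
      rw [PySem.List.pyGet?_natCast, PySem.List.pyGet?_natCast,
        List.getElem?_append_left hm]
    simp only [pvAltGo, hget, ih (Nat.le_of_lt hm)]

theorem pvMain (coarse fine feature_point : String) :
    ∀ (list : List (List (String × String))),
      getRepeatFeaturePointIndex list coarse fine feature_point =
        getRepeatFeaturePointIndex_alt list coarse fine feature_point := by
  intro list
  induction list using List.reverseRecOn with
  | nil => rfl
  | append_singleton l x ih =>
    rw [pvFoldA_eq, List.foldl_append]
    have hfst := pvFoldA_fst coarse fine feature_point l (-1, -1)
    unfold getRepeatFeaturePointIndex_alt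
    simp only [List.length_append, List.length_cons, List.length_nil]
    show (pvStepA coarse fine feature_point (l.foldl (pvStepA coarse fine feature_point) (-1, -1)) x).2 =
      pvAltGo (l ++ [x]) coarse fine feature_point (l.length + 1)
    have hx : PySem.List.pyGet? (l ++ [x]) (l.length : Int) = some x := by
      rw [PySem.List.pyGet?_natCast]
      simp
    simp only [pvAltGo, hx, Option.getD_some]
    rw [pvAltGo_append l x coarse fine feature_point l.length (Nat.le_refl _)]
    by_cases hmatch : pvMatch x coarse fine feature_point
    · simp only [pvStepA, hmatch, if_true, hfst]
      ring
    · simp only [pvStepA, hmatch]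
      rw [← pvFoldA_eq, ih]
      rfl

-- ===== VERDICT (by name: the statement is the Claim_ definition above) =====
theorem getRepeatFeaturePointIndex_spec : Claim_equal_getRepeatFeaturePointIndex := by
  intro list coarse fine feature_point _ _
  unfold Spec_getRepeatFeaturePointIndex
  exact pvMain coarse fine feature_point list
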